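-- pv_equiv track=rewrite | github.com/cdccnleo/RQA2025 | cleanup_conditional_skips.py | categorize_skips
-- ===== SOURCE A (Python) =====
-- def categorize_skips(skip_patterns):
--     """分类跳过调用"""
--     categories = {
--         'infrastructure_adapters': [],
--         'component_unavailable': [],
--         'function_unimplemented': [],
--         'parameter_issues': [],
--         'other': []
--     }
--
--     for file_path, skips in skip_patterns.items():
--         for skip in skips:
--             skip_text = skip.lower()
--
--             if 'adapter' in skip_text and ('not available' in skip_text or 'factory' in skip_text):
--                 categories['infrastructure_adapters'].append((file_path, skip))
--             elif 'not available' in skip_text or 'unavailable' in skip_text: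
--                 categories['component_unavailable'].append((file_path, skip))
--             elif 'unimplemented' in skip_text or 'not implemented' in skip_text:
--                 categories['function_unimplemented'].append((file_path, skip))
--             elif 'parameter' in skip_text or 'requires' in skip_text:
--                 categories['parameter_issues'].append((file_path, skip))
--             else:
--                 categories['other'].append((file_path, skip))
--
--     return categories
-- ===== SOURCE B (Python) =====
-- def categorize_skips(skip_patterns):
--     """分类跳过调用"""
--     KEYS = ('infrastructure_adapters', 'component_unavailable',
--             'function_unimplemented', 'parameter_issues', 'other')
--
--     def bucket(skip):
--         t = skip.lower()
--         flags = (
--             'adapter' in t and ('not available' in t or 'factory' in t),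
--             'not available' in t or 'unavailable' in t,
--             'unimplemented' in t or 'not implemented' in t,
--             'parameter' in t or 'requires' in t,
--             True,
--         )
--         return KEYS[flags.index(True)]
--
--     tagged = [(bucket(skip), (fp, skip))
--               for fp, skips in skip_patterns.items()
--               for skip in skips]
--
--     return {key: [pair for tag, pair in tagged if tag == key] for key in KEYS}
-- ===== Notes on version B (the rewrite author's own statement) =====
-- stated objective: alternative
-- what changed: Replaces A's single pass that appends into a categories dict via an if/elif cascade with a two-stage pipeline: first flatten all (file, skip) pairs and tag each with its bucket (chosen by indexing the first True in a flags tuple into a key tuple), then build the result dict by one filtering comprehension per category.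
import Mathlib
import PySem

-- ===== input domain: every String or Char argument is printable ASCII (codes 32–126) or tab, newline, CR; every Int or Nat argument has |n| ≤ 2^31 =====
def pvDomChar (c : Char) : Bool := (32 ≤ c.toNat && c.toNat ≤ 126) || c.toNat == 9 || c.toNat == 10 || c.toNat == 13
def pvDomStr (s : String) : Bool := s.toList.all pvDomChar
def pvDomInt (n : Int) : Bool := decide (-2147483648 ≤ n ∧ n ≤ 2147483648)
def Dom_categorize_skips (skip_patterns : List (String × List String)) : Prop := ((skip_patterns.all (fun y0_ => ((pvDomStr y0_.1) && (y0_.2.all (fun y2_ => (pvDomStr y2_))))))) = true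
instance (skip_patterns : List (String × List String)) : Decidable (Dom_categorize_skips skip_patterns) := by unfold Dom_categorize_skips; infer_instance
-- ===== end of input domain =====

-- B replaces A's single-pass dict accumulation (if/elif cascade appending into a mutable
-- categories dict) by a two-stage pipeline: flatten-and-tag every (file, skip) pair with its
-- bucket key, then build each category by filtering the tagged list (objective: alternative).

-- ===== PORT A =====
def categorize_skips (skip_patterns : List (String × List String)) : List (String × List (String × String)) :=
  let categories : PySem.Dict String (List (String × String)) :=
    PySem.Dict.ofList [("infrastructure_adapters", []), ("component_unavailable", []),
                       ("function_unimplemented", []), ("parameter_issues", []), ("other", [])]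
  let categories := skip_patterns.foldl (fun categories fp_skips =>
    fp_skips.2.foldl (fun categories skip =>
      let skip_text := PySem.Str.lower skip
      if PySem.Str.isIn "adapter" skip_text &&
         (PySem.Str.isIn "not available" skip_text || PySem.Str.isIn "factory" skip_text) then
        categories.modify "infrastructure_adapters" [] (· ++ [(fp_skips.1, skip)])
      else if PySem.Str.isIn "not available" skip_text || PySem.Str.isIn "unavailable" skip_text then
        categories.modify "component_unavailable" [] (· ++ [(fp_skips.1, skip)])
      else if PySem.Str.isIn "unimplemented" skip_text || PySem.Str.isIn "not implemented" skip_text then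
        categories.modify "function_unimplemented" [] (· ++ [(fp_skips.1, skip)])
      else if PySem.Str.isIn "parameter" skip_text || PySem.Str.isIn "requires" skip_text then
        categories.modify "parameter_issues" [] (· ++ [(fp_skips.1, skip)])
      else
        categories.modify "other" [] (· ++ [(fp_skips.1, skip)])) categories) categories
  categories.items

-- ===== PORT B =====
def csKeys : List String :=
  ["infrastructure_adapters", "component_unavailable", "function_unimplemented",
   "parameter_issues", "other"]

-- KEYS[flags.index(True)]; the 'index' never raises since the last flag is literally True,
-- so the none branch is unreachable
def csBucket (skip : String) : String :=
  let t := PySem.Str.lower skip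
  let flags : List Bool :=
    [PySem.Str.isIn "adapter" t && (PySem.Str.isIn "not available" t || PySem.Str.isIn "factory" t),
     PySem.Str.isIn "not available" t || PySem.Str.isIn "unavailable" t,
     PySem.Str.isIn "unimplemented" t || PySem.Str.isIn "not implemented" t,
     PySem.Str.isIn "parameter" t || PySem.Str.isIn "requires" t,
     true]
  match PySem.List.index? flags true with
  | some i => PySem.List.pyGetD csKeys (i : Int) ""
  | none => ""

def categorize_skips_alt (skip_patterns : List (String × List String)) : List (String × List (String × String)) :=
  let tagged : List (String × (String × String)) :=
    skip_patterns.flatMap (fun fs => fs.2.map (fun skip => (csBucket skip, (fs.1, skip))))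
  csKeys.map (fun key => (key, (tagged.filter (fun q => q.1 == key)).map (fun q => q.2)))

-- ===== PRECONDITION & SPEC =====
def Spec_categorize_skips (skip_patterns : List (String × List String)) (out : List (String × List (String × String))) : Prop := out = categorize_skips_alt skip_patterns
instance (skip_patterns : List (String × List String)) (out : List (String × List (String × String))) : Decidable (Spec_categorize_skips skip_patterns out) := by unfold Spec_categorize_skips; infer_instance

-- ===== CLAIM (what is proved, stated in full; the proofs are below) =====
def Claim_equal_categorize_skips : Prop := ∀ (skip_patterns : List (String × List String)), Dom_categorize_skips skip_patterns → Spec_categorize_skips skip_patterns (categorize_skips skip_patterns)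

-- ===== LEMMAS AND PROOFS =====

-- A's if/elif cascade appends exactly to the bucket B's flags-index lookup names
theorem cs_step_eq (d : PySem.Dict String (List (String × String))) (fp skip : String) :
    (if PySem.Str.isIn "adapter" (PySem.Str.lower skip) &&
         (PySem.Str.isIn "not available" (PySem.Str.lower skip) || PySem.Str.isIn "factory" (PySem.Str.lower skip)) then
        d.modify "infrastructure_adapters" [] (· ++ [(fp, skip)])
      else if PySem.Str.isIn "not available" (PySem.Str.lower skip) || PySem.Str.isIn "unavailable" (PySem.Str.lower skip) then
        d.modify "component_unavailable" [] (· ++ [(fp, skip)])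
      else if PySem.Str.isIn "unimplemented" (PySem.Str.lower skip) || PySem.Str.isIn "not implemented" (PySem.Str.lower skip) then
        d.modify "function_unimplemented" [] (· ++ [(fp, skip)])
      else if PySem.Str.isIn "parameter" (PySem.Str.lower skip) || PySem.Str.isIn "requires" (PySem.Str.lower skip) then
        d.modify "parameter_issues" [] (· ++ [(fp, skip)])
      else
        d.modify "other" [] (· ++ [(fp, skip)]))
    = d.modify (csBucket skip) [] (· ++ [(fp, skip)]) := by
  simp only [csBucket]
  generalize PySem.Str.isIn "adapter" (PySem.Str.lower skip) = b1
  generalize PySem.Str.isIn "not available" (PySem.Str.lower skip) = b2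
  generalize PySem.Str.isIn "factory" (PySem.Str.lower skip) = b3
  generalize PySem.Str.isIn "unavailable" (PySem.Str.lower skip) = b4
  generalize PySem.Str.isIn "unimplemented" (PySem.Str.lower skip) = b5
  generalize PySem.Str.isIn "not implemented" (PySem.Str.lower skip) = b6
  generalize PySem.Str.isIn "parameter" (PySem.Str.lower skip) = b7
  generalize PySem.Str.isIn "requires" (PySem.Str.lower skip) = b8
  cases b1 <;> cases b2 <;> cases b3 <;> cases b4 <;> cases b5 <;> cases b6 <;> cases b7 <;> cases b8 <;> rfl

-- csBucket always lands in csKeys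
theorem csBucket_mem (skip : String) : csBucket skip ∈ csKeys := by
  simp only [csBucket]
  generalize PySem.Str.isIn "adapter" (PySem.Str.lower skip) = b1
  generalize PySem.Str.isIn "not available" (PySem.Str.lower skip) = b2
  generalize PySem.Str.isIn "factory" (PySem.Str.lower skip) = b3
  generalize PySem.Str.isIn "unavailable" (PySem.Str.lower skip) = b4
  generalize PySem.Str.isIn "unimplemented" (PySem.Str.lower skip) = b5
  generalize PySem.Str.isIn "not implemented" (PySem.Str.lower skip) = b6
  generalize PySem.Str.isIn "parameter" (PySem.Str.lower skip) = b7
  generalize PySem.Str.isIn "requires" (PySem.Str.lower skip) = b8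
  cases b1 <;> cases b2 <;> cases b3 <;> cases b4 <;> cases b5 <;> cases b6 <;> cases b7 <;> cases b8 <;> decide

-- the initial five-key dict of port A, and the getD fact the grouping needs
theorem cs_init_getD (c : String) :
    (PySem.Dict.ofList [("infrastructure_adapters", ([] : List (String × String))),
        ("component_unavailable", []), ("function_unimplemented", []),
        ("parameter_issues", []), ("other", [])]).getD c [] = [] := by
  have h : PySem.Dict.ofList [("infrastructure_adapters", ([] : List (String × String))),
        ("component_unavailable", []), ("function_unimplemented", []),
        ("parameter_issues", []), ("other", [])]
      = PySem.Dict.mk [("infrastructure_adapters", []), ("component_unavailable", []),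
        ("function_unimplemented", []), ("parameter_issues", []), ("other", [])] := by decide
  rw [h, PySem.Dict.getD_eq_get?_getD]
  simp [PySem.Dict.get?_mk_cons]
  split_ifs <;> rfl

-- A as a single fold of the tagged pair list, by the step lemma
theorem cs_A_eq_fold (sp : List (String × List String)) :
    categorize_skips sp
      = ((sp.flatMap (fun fs => fs.2.map (fun skip => (csBucket skip, (fs.1, skip))))).foldl
          (fun d q => d.modify q.1 [] (· ++ [q.2]))
          (PySem.Dict.ofList [("infrastructure_adapters", []), ("component_unavailable", []),
            ("function_unimplemented", []), ("parameter_issues", []), ("other", [])])).items := by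
  simp only [categorize_skips, cs_step_eq, List.foldl_flatMap, List.foldl_map]

-- ===== VERDICT (by name: the statement is the Claim_ definition above) =====
theorem categorize_skips_spec : Claim_equal_categorize_skips := by
  intro sp _
  show categorize_skips sp = categorize_skips_alt sp
  rw [cs_A_eq_fold, categorize_skips_alt]
  set tagged := sp.flatMap (fun fs => fs.2.map (fun skip => (csBucket skip, (fs.1, skip)))) with htag
  set init : PySem.Dict String (List (String × String)) :=
    PySem.Dict.ofList [("infrastructure_adapters", []), ("component_unavailable", []),
      ("function_unimplemented", []), ("parameter_issues", []), ("other", [])] with hinit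
  set D := tagged.foldl (fun d q => d.modify q.1 [] (· ++ [q.2])) init with hD
  have htags : ∀ y ∈ tagged.map (fun q => q.1), y ∈ csKeys := by
    intro y hy
    simp only [htag, List.map_flatMap, List.map_map, List.mem_flatMap, List.mem_map] at hy
    obtain ⟨fs, _, skip, _, hy⟩ := hy
    rw [← hy]; exact csBucket_mem skip
  have hkeys : D.keys = csKeys := by
    rw [hD, PySem.Dict.keys_foldl_modify_key
          (key := fun (q : String × String × String) => q.1)
          (f := fun (_ : PySem.Dict String (List (String × String)))
                    (q : String × String × String) => (fun l => l ++ [q.2]))]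
    have hik : init.keys = csKeys := by decide
    rw [hik, PySem.Set.update_eq_append_filter]
    have : (PySem.Set.ofList (tagged.map (fun q => q.1))).filter
        (fun y => !(PySem.Set.contains csKeys y)) = [] := by
      rw [List.filter_eq_nil_iff]
      intro y hy
      have hmem : y ∈ csKeys := htags y ((PySem.Set.mem_ofList _ y).mp hy)
      simp [hmem]
    rw [this, List.append_nil]
  have hnd : D.keys.Nodup := by rw [hkeys]; decide
  rw [PySem.Dict.items_eq_map_keys D hnd [], hkeys]
  apply List.map_congr_left
  intro k _
  have hg : D.getD k [] = init.getD k [] ++ (tagged.filter (fun p => p.1 == k)).map (fun p => p.2) := by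
    rw [hD]; exact PySem.Dict.getD_foldl_modify_append tagged init k
  rw [hg, hinit, cs_init_getD, List.nil_append]
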